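-- pv_equiv track=rewrite | github.com/arer90/ANO_solubility_prediction | extra_code/ano_feature_selection.py | convert_params_to_selection
-- ===== SOURCE A (Python) =====
-- def convert_params_to_selection(best_feature_params):
--     """
--     Convert best feature parameters to selection list
--     """
--     # Map descriptor names to their indices in the selection list
--     descriptor_to_index = {
--         'MolWt': 0, 'MolLogP': 1, 'MolMR': 2, 'TPSA': 3, 'NumRotatableBonds': 4,
--         'HeavyAtomCount': 5, 'NumHAcceptors': 6, 'NumHDonors': 7, 'NumHeteroatoms': 8,
--         'NumValenceElectrons': 9, 'NHOHCount': 10, 'NOCount': 11, 'RingCount': 12,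
--         'NumAromaticRings': 13, 'NumSaturatedRings': 14, 'NumAliphaticRings': 15,
--         'LabuteASA': 16, 'BalabanJ': 17, 'BertzCT': 18, 'Ipc': 19, 'kappa_Series[1-3]_ind': 20,
--         'Chi_Series[13]_ind': 21, 'Phi': 22, 'HallKierAlpha': 23, 'NumAmideBonds': 24,
--         'FractionCSP3': 25, 'NumSpiroAtoms': 26, 'NumBridgeheadAtoms': 27,
--         'PEOE_VSA_Series[1-14]_ind': 28, 'SMR_VSA_Series[1-10]_ind': 29,
--         'SlogP_VSA_Series[1-12]_ind': 30, 'EState_VSA_Series[1-11]_ind': 31,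
--         'VSA_EState_Series[1-10]': 32, 'MQNs': 33, 'AUTOCORR2D': 34, 'BCUT2D': 35,
--         'Asphericity': 36, 'PBF': 37, 'RadiusOfGyration': 38, 'InertialShapeFactor': 39,
--         'Eccentricity': 40, 'SpherocityIndex': 41, 'PMI_series[1-3]_ind': 42,
--         'NPR_series[1-2]_ind': 43, 'AUTOCORR3D': 44, 'RDF': 45, 'MORSE': 46,
--         'WHIM': 47, 'GETAWAY': 48
--     }
--
--     # Initialize selection list with zeros
--     selection = [0] * 49
--
--     # Set values based on best_feature_params
--     for descriptor_name, value in best_feature_params.items():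
--         if descriptor_name in descriptor_to_index:
--             selection[descriptor_to_index[descriptor_name]] = value
--
--     return selection
-- ===== SOURCE B (Python) =====
-- # Descriptor names in selection-index order (index = position in this list).
-- DESCRIPTOR_NAMES = [
--     'MolWt', 'MolLogP', 'MolMR', 'TPSA', 'NumRotatableBonds',
--     'HeavyAtomCount', 'NumHAcceptors', 'NumHDonors', 'NumHeteroatoms',
--     'NumValenceElectrons', 'NHOHCount', 'NOCount', 'RingCount',
--     'NumAromaticRings', 'NumSaturatedRings', 'NumAliphaticRings',
--     'LabuteASA', 'BalabanJ', 'BertzCT', 'Ipc', 'kappa_Series[1-3]_ind',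
--     'Chi_Series[13]_ind', 'Phi', 'HallKierAlpha', 'NumAmideBonds',
--     'FractionCSP3', 'NumSpiroAtoms', 'NumBridgeheadAtoms',
--     'PEOE_VSA_Series[1-14]_ind', 'SMR_VSA_Series[1-10]_ind',
--     'SlogP_VSA_Series[1-12]_ind', 'EState_VSA_Series[1-11]_ind',
--     'VSA_EState_Series[1-10]', 'MQNs', 'AUTOCORR2D', 'BCUT2D',
--     'Asphericity', 'PBF', 'RadiusOfGyration', 'InertialShapeFactor',
--     'Eccentricity', 'SpherocityIndex', 'PMI_series[1-3]_ind',
--     'NPR_series[1-2]_ind', 'AUTOCORR3D', 'RDF', 'MORSE',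
--     'WHIM', 'GETAWAY'
-- ]
--
-- def convert_params_to_selection(best_feature_params):
--     """
--     Convert best feature parameters to selection list
--     """
--     # Gather: walk the fixed 49-entry schema and look each name up in the input.
--     return [best_feature_params.get(name, 0) for name in DESCRIPTOR_NAMES]
-- ===== Notes on version B (the rewrite author's own statement) =====
-- stated objective: idiomatic
-- what changed: A preallocates a 49-zero list and scatters input values into slots via a name-to-index dict; B inverts the control flow and gathers, mapping over the fixed 49-name schema with best_feature_params.get(name, 0). Pre_ only excludes association lists with duplicate keys, which represent no Python dict (the argument is a dict, so every actual Python input is admitted).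
import Mathlib
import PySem

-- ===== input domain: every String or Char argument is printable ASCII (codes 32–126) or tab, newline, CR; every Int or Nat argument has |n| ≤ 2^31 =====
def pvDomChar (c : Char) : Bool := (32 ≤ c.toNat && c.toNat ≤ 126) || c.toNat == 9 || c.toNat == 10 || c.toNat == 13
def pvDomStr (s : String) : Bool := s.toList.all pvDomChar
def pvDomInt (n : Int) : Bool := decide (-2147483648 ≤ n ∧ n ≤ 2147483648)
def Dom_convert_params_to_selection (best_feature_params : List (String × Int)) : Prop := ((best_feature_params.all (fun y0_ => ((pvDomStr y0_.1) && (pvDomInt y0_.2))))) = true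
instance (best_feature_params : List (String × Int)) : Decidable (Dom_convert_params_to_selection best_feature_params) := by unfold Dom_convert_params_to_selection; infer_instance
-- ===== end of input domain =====

-- B gathers over the fixed 49-name schema with dict.get(name, 0) instead of A's scatter
-- into a preallocated zero list (idiomatic inversion of the control flow; same result).


-- ===== PORT A =====
-- the literal dict descriptor_to_index
def pvIdx : PySem.Dict String Int := PySem.Dict.ofList [
  ("MolWt", 0), ("MolLogP", 1), ("MolMR", 2), ("TPSA", 3), ("NumRotatableBonds", 4),
  ("HeavyAtomCount", 5), ("NumHAcceptors", 6), ("NumHDonors", 7), ("NumHeteroatoms", 8),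
  ("NumValenceElectrons", 9), ("NHOHCount", 10), ("NOCount", 11), ("RingCount", 12),
  ("NumAromaticRings", 13), ("NumSaturatedRings", 14), ("NumAliphaticRings", 15),
  ("LabuteASA", 16), ("BalabanJ", 17), ("BertzCT", 18), ("Ipc", 19), ("kappa_Series[1-3]_ind", 20),
  ("Chi_Series[13]_ind", 21), ("Phi", 22), ("HallKierAlpha", 23), ("NumAmideBonds", 24),
  ("FractionCSP3", 25), ("NumSpiroAtoms", 26), ("NumBridgeheadAtoms", 27),
  ("PEOE_VSA_Series[1-14]_ind", 28), ("SMR_VSA_Series[1-10]_ind", 29),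
  ("SlogP_VSA_Series[1-12]_ind", 30), ("EState_VSA_Series[1-11]_ind", 31),
  ("VSA_EState_Series[1-10]", 32), ("MQNs", 33), ("AUTOCORR2D", 34), ("BCUT2D", 35),
  ("Asphericity", 36), ("PBF", 37), ("RadiusOfGyration", 38), ("InertialShapeFactor", 39),
  ("Eccentricity", 40), ("SpherocityIndex", 41), ("PMI_series[1-3]_ind", 42),
  ("NPR_series[1-2]_ind", 43), ("AUTOCORR3D", 44), ("RDF", 45), ("MORSE", 46),
  ("WHIM", 47), ("GETAWAY", 48)]

-- loop body: 'if descriptor_name in descriptor_to_index: selection[idx] = value'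
-- (all indices in the literal dict are nonnegative and < 49, so List.set is exact here)
def pvStep (sel : List Int) (p : String × Int) : List Int :=
  match pvIdx.get? p.1 with
  | some i => sel.set i.toNat p.2
  | none => sel

def convert_params_to_selection (best_feature_params : List (String × Int)) : List Int :=
  best_feature_params.foldl pvStep (List.replicate 49 (0 : Int))

-- ===== PORT B =====
-- DESCRIPTOR_NAMES, the 49 names in index order
def pvNames : List String := [
  "MolWt", "MolLogP", "MolMR", "TPSA", "NumRotatableBonds",
  "HeavyAtomCount", "NumHAcceptors", "NumHDonors", "NumHeteroatoms",
  "NumValenceElectrons", "NHOHCount", "NOCount", "RingCount",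
  "NumAromaticRings", "NumSaturatedRings", "NumAliphaticRings",
  "LabuteASA", "BalabanJ", "BertzCT", "Ipc", "kappa_Series[1-3]_ind",
  "Chi_Series[13]_ind", "Phi", "HallKierAlpha", "NumAmideBonds",
  "FractionCSP3", "NumSpiroAtoms", "NumBridgeheadAtoms",
  "PEOE_VSA_Series[1-14]_ind", "SMR_VSA_Series[1-10]_ind",
  "SlogP_VSA_Series[1-12]_ind", "EState_VSA_Series[1-11]_ind",
  "VSA_EState_Series[1-10]", "MQNs", "AUTOCORR2D", "BCUT2D",
  "Asphericity", "PBF", "RadiusOfGyration", "InertialShapeFactor",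
  "Eccentricity", "SpherocityIndex", "PMI_series[1-3]_ind",
  "NPR_series[1-2]_ind", "AUTOCORR3D", "RDF", "MORSE",
  "WHIM", "GETAWAY"]

def convert_params_to_selection_alt (best_feature_params : List (String × Int)) : List Int :=
  pvNames.map (fun name => (PySem.Dict.mk best_feature_params).getD name 0)

-- ===== PRECONDITION & SPEC =====
-- Pre_ excludes association lists with duplicate keys: the Python argument is a dict, so a
-- duplicate-keyed list represents no Python input; on such lists A's last-write-wins and
-- B's first-match are both encoding artefacts. Every actual Python dict input is admitted.
def Pre_convert_params_to_selection (best_feature_params : List (String × Int)) : Prop :=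
  (best_feature_params.map Prod.fst).Nodup
instance (best_feature_params : List (String × Int)) : Decidable (Pre_convert_params_to_selection best_feature_params) := by unfold Pre_convert_params_to_selection; infer_instance

def pvWitness_convert_params_to_selection : (List (String × Int)) := [("MolWt", 3), ("RDF", -2), ("junk", 7)]

def Spec_convert_params_to_selection (best_feature_params : List (String × Int)) (out : List Int) : Prop := out = convert_params_to_selection_alt best_feature_params
instance (best_feature_params : List (String × Int)) (out : List Int) : Decidable (Spec_convert_params_to_selection best_feature_params out) := by unfold Spec_convert_params_to_selection; infer_instance

-- ===== CLAIM (what is proved, stated in full; the proofs are below) =====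
def Claim_equal_convert_params_to_selection : Prop := ∀ (best_feature_params : List (String × Int)), Dom_convert_params_to_selection best_feature_params → Pre_convert_params_to_selection best_feature_params → Spec_convert_params_to_selection best_feature_params (convert_params_to_selection best_feature_params)

-- ===== LEMMAS AND PROOFS =====

-- every entry of the index dict is (pvNames[i], i) with 0 ≤ i < 49
set_option maxRecDepth 10000 in
lemma pv_idx_entries : ∀ p ∈ pvIdx.items, 0 ≤ p.2 ∧ p.2.toNat < 49 ∧ pvNames.getD p.2.toNat "" = p.1 := by decide

-- looking the j-th name up in the index dict yields j
set_option maxRecDepth 10000 in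
lemma pv_idx_name : ∀ j < 49, pvIdx.get? (pvNames.getD j "") = some (j : Int) := by decide

lemma pv_names_len : pvNames.length = 49 := by rfl

-- getD on a cons-shaped literal dict (first match), via PySem.Dict.get?_mk_cons
lemma pv_getD_mk_cons (p : String × Int) (t : List (String × Int)) (x : String) (d : Int) :
    (PySem.Dict.mk (p :: t)).getD x d = if p.1 == x then p.2 else (PySem.Dict.mk t).getD x d := by
  rw [PySem.Dict.getD_eq_get?_getD, PySem.Dict.get?_mk_cons]
  split <;> simp [PySem.Dict.getD_eq_get?_getD]

lemma pv_loop_length (l : List (String × Int)) (acc : List Int) :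
    (l.foldl pvStep acc).length = acc.length := by
  induction l generalizing acc with
  | nil => rfl
  | cons p t ih =>
      simp only [List.foldl_cons]
      rw [ih]
      unfold pvStep
      cases pvIdx.get? p.1 <;> simp

lemma pv_get?_mk_not_mem (l : List (String × Int)) (k : String) (h : k ∉ l.map Prod.fst) :
    (PySem.Dict.mk l).get? k = none := by
  induction l with
  | nil => rfl
  | cons p t ih =>
      simp only [List.map_cons, List.mem_cons, not_or] at h
      have hne : ¬ (p.1 == k) = true := by
        simp only [beq_iff_eq]
        exact fun hh => h.1 hh.symm
      rw [PySem.Dict.get?_mk_cons, if_neg hne]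
      exact ih h.2

-- loop invariant: after scattering l into acc, slot j holds the (unique) value of the
-- j-th name in l if present, else acc's old slot j
set_option maxRecDepth 10000 in
lemma pv_main (l : List (String × Int)) (acc : List Int) (hlen : acc.length = 49)
    (hnd : (l.map Prod.fst).Nodup) (j : Nat) (hj : j < 49) :
    (l.foldl pvStep acc).getD j 0
      = (PySem.Dict.mk l).getD (pvNames.getD j "") (acc.getD j 0) := by
  induction l generalizing acc with
  | nil =>
      rw [PySem.Dict.getD_eq_get?_getD, pv_get?_mk_not_mem [] _ (by simp)]
      rfl
  | cons p t ih =>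
      simp only [List.map_cons, List.nodup_cons] at hnd
      have hlen' : ∀ acc' : List Int, acc' = pvStep acc p → acc'.length = 49 := by
        intro acc' h; subst h; unfold pvStep; cases pvIdx.get? p.1 <;> simp [hlen]
      rw [List.foldl_cons, ih (pvStep acc p) (hlen' _ rfl) hnd.2, pv_getD_mk_cons]
      by_cases hk : p.1 = pvNames.getD j ""
      · -- this entry is name j: the inner dict has no further p.1 entry, slot j was set to p.2
        rw [if_pos (show (p.1 == pvNames.getD j "") = true from beq_iff_eq.mpr hk)]
        rw [PySem.Dict.getD_eq_get?_getD]
        rw [hk] at hnd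
        rw [pv_get?_mk_not_mem t _ hnd.1]
        have hstep : pvStep acc p = acc.set j p.2 := by
          unfold pvStep
          rw [hk, pv_idx_name j hj]
          simp
        simp [hstep, List.getD, hlen, hj]
      · -- different name: slot j is untouched by this entry
        rw [if_neg (show ¬ (p.1 == pvNames.getD j "") = true from by simp only [beq_iff_eq]; exact hk)]
        have hacc : (pvStep acc p).getD j 0 = acc.getD j 0 := by
          unfold pvStep
          cases hg : pvIdx.get? p.1 with
          | none => rfl
          | some i =>
              have hmem := PySem.Dict.mem_items_of_get?_eq_some pvIdx hg
              have hi := pv_idx_entries _ hmem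
              have hij : i.toNat ≠ j := by
                intro h
                exact hk (by rw [← hi.2.2, h])
              simp [List.getD, List.getElem?_set_ne hij]
        rw [hacc]

theorem pv_equal (l : List (String × Int)) (hnd : (l.map Prod.fst).Nodup) :
    convert_params_to_selection l = convert_params_to_selection_alt l := by
  have hlenA : (convert_params_to_selection l).length = 49 := by
    rw [convert_params_to_selection, pv_loop_length, List.length_replicate]
  have hlenB : (convert_params_to_selection_alt l).length = 49 := by
    rw [convert_params_to_selection_alt, List.length_map, pv_names_len]
  apply List.ext_getElem (by rw [hlenA, hlenB])
  intro j h1 h2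
  have hj : j < 49 := by rwa [hlenA] at h1
  have hjn : j < pvNames.length := by rwa [pv_names_len]
  have hA : (convert_params_to_selection l)[j] = (convert_params_to_selection l).getD j 0 := by
    simp [List.getD, List.getElem?_eq_getElem h1]
  have hrep : (List.replicate 49 (0 : Int)).getD j 0 = 0 := by
    exact List.getD_replicate _ hj
  have hname : pvNames.getD j "" = pvNames[j] := by
    simp [List.getD, List.getElem?_eq_getElem hjn]
  rw [hA, convert_params_to_selection, pv_main l _ (by simp) hnd j hj, hrep]
  simp only [convert_params_to_selection_alt, List.getElem_map, hname]

-- ===== VERDICT (by name: the statement is the Claim_ definition above) =====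
theorem convert_params_to_selection_spec : Claim_equal_convert_params_to_selection := by
  intro l _ hpre
  unfold Spec_convert_params_to_selection
  exact pv_equal l hpre
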